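-- pv_equiv track=rewrite | github.com/Felipestscosta/BRK-Populate-Database-ERP | importer.py | preparar_nomes_colunas
-- ===== SOURCE A (Python) =====
-- from typing import Iterable, List
--
-- def preparar_nomes_colunas(colunas: Iterable[str]) -> List[str]:
--     """Garante que os nomes das colunas sejam adequados para uso em SQL."""
--     nomes_ajustados: List[str] = []
--     colunas_existentes = set()
--
--     for indice, coluna in enumerate(colunas, start=1):
--         nome = str(coluna).strip()
--
--         if not nome:
--             nome = f"coluna_{indice}"
--
--         nome_original = nome
--         contador = 1
--         while nome in colunas_existentes:
--             contador += 1
--             nome = f"{nome_original}_{contador}"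
--
--         colunas_existentes.add(nome)
--         nomes_ajustados.append(nome)
--
--     return nomes_ajustados
-- ===== SOURCE B (Python) =====
-- from typing import Iterable, List
--
-- def preparar_nomes_colunas(colunas: Iterable[str]) -> List[str]:
--     """Garante que os nomes das colunas sejam adequados para uso em SQL."""
--     bases = [str(c).strip() or f"coluna_{i}" for i, c in enumerate(colunas, 1)]
--     usados = set()
--     proximo = {}  # per-base resume point: every suffix up to it is already taken
--     saida: List[str] = []
--     for base in bases:
--         k = proximo.get(base, 1)
--         nome = base if k == 1 else f"{base}_{k}"
--         while nome in usados:
--             k += 1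
--             nome = f"{base}_{k}"
--         proximo[base] = k
--         usados.add(nome)
--         saida.append(nome)
--     return saida
-- ===== Notes on version B (the rewrite author's own statement) =====
-- stated objective: faster
-- what changed: B keeps a per-base-name dictionary of the last used suffix counter and resumes probing from it (still checked against the seen-set), instead of A's restarting the collision counter at 1 for every duplicate, which makes A quadratic in the number of repeats of a name.
import Mathlib
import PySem

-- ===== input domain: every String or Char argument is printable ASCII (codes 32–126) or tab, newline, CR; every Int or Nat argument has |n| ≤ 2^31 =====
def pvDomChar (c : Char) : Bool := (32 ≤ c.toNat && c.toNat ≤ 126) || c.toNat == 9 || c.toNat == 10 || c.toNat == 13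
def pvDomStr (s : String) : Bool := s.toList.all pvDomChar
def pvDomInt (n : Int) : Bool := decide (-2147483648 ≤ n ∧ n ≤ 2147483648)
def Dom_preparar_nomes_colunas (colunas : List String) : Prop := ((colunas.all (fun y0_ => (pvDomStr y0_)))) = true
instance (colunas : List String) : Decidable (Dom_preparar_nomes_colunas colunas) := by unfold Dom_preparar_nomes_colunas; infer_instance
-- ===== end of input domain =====

-- ===== PORT A =====
-- B resumes each base name's collision counter from a per-base cache instead of restarting at 1 (objective: faster on collision-heavy inputs).
-- Python string concatenation f"{a}_{b}", exact on all inputs (works on the character list).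
def pvCat (a b : String) : String := String.ofList (a.toList ++ b.toList)

-- f"{base}_{k}"
def pvSuffixed (base : String) (k : Int) : String := pvCat (pvCat base "_") (PySem.Int.toStr k)

-- the shared while-loop of both Pythons: while nome in existentes: contador += 1; nome = f"{base}_{contador}".
-- fuel only makes the loop total; pvProbe_fuel_le below proves |existentes|+1 steps always suffice.
def pvProbe (ex : PySem.Set String) (base : String) (k : Int) (nome : String) : Nat → String × Int
  | 0 => (nome, k)
  | f + 1 =>
    if PySem.Set.contains ex nome then pvProbe ex base (k + 1) (pvSuffixed base (k + 1)) f
    else (nome, k)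

def pvGoA : List String → Int → PySem.Set String → List String → List String
  | [], _, _, acc => acc
  | coluna :: rest, idx, ex, acc =>
    let nome0 := PySem.Str.strip coluna
    let nome1 := if nome0 = "" then pvCat "coluna_" (PySem.Int.toStr idx) else nome0
    let r := pvProbe ex nome1 1 nome1 (ex.length + 1)
    pvGoA rest (idx + 1) (PySem.Set.add ex r.1) (acc ++ [r.1])

def preparar_nomes_colunas (colunas : List String) : List String :=
  pvGoA colunas 1 PySem.Set.empty []

-- ===== PORT B =====
-- first pass: the sanitized base names (the list comprehension in Source B)
def pvBases : List String → Int → List String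
  | [], _ => []
  | c :: rest, i =>
    (if PySem.Str.strip c = "" then pvCat "coluna_" (PySem.Int.toStr i) else PySem.Str.strip c)
      :: pvBases rest (i + 1)

-- second pass: dedup with the per-base resume counter `cnt` (the for-loop in Source B)
def pvGoB : List String → PySem.Set String → PySem.Dict String Int → List String → List String
  | [], _, _, saida => saida
  | base :: rest, ex, cnt, saida =>
    let k := cnt.getD base 1
    let nome0 := if k = 1 then base else pvSuffixed base k
    let r := pvProbe ex base k nome0 (ex.length + 1)
    pvGoB rest (PySem.Set.add ex r.1) (cnt.insert base r.2) (saida ++ [r.1])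

def preparar_nomes_colunas_alt (colunas : List String) : List String :=
  pvGoB (pvBases colunas 1) PySem.Set.empty PySem.Dict.empty []

-- ===== PRECONDITION & SPEC =====
def Spec_preparar_nomes_colunas (colunas : List String) (out : List String) : Prop := out = preparar_nomes_colunas_alt colunas
instance (colunas : List String) (out : List String) : Decidable (Spec_preparar_nomes_colunas colunas out) := by unfold Spec_preparar_nomes_colunas; infer_instance

-- ===== CLAIM (what is proved, stated in full; the proofs are below) =====
def Claim_equal_preparar_nomes_colunas : Prop := ∀ (colunas : List String), Dom_preparar_nomes_colunas colunas → Spec_preparar_nomes_colunas colunas (preparar_nomes_colunas colunas)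

-- ===== LEMMAS AND PROOFS =====
lemma pvToDigitsCore_eq (f : Nat) : ∀ (n : Nat) (l : List Char), n ≠ 0 → n < f →
    Nat.toDigitsCore 10 f n l = ((Nat.digits 10 n).map Nat.digitChar).reverse ++ l := by
  induction f with
  | zero => intro n l hn h; omega
  | succ f ih =>
    intro n l hn h
    rw [Nat.toDigitsCore]
    rw [Nat.digits_def' (b := 10) (by norm_num) (Nat.pos_of_ne_zero hn)]
    by_cases h0 : n / 10 = 0
    · simp [h0]
    · rw [if_neg h0, ih (n / 10) _ h0 (by
        have h2 : n / 10 < n := Nat.div_lt_self (Nat.pos_of_ne_zero hn) (by norm_num)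
        omega)]
      simp

lemma pvToDigits_eq (n : Nat) (hn : n ≠ 0) :
    Nat.toDigits 10 n = ((Nat.digits 10 n).map Nat.digitChar).reverse := by
  rw [Nat.toDigits, pvToDigitsCore_eq (n+1) n [] hn (by omega), List.append_nil]

lemma pvDigitChar_injOn : ∀ a < 10, ∀ b < 10, Nat.digitChar a = Nat.digitChar b → a = b := by decide

lemma pvMapDigitChar_inj : ∀ (l1 l2 : List Nat), (∀ x ∈ l1, x < 10) → (∀ x ∈ l2, x < 10) →
    l1.map Nat.digitChar = l2.map Nat.digitChar → l1 = l2 := by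
  intro l1
  induction l1 with
  | nil => intro l2 _ _ h; cases l2 <;> simp_all
  | cons a t ih =>
    intro l2 h1 h2 h
    cases l2 with
    | nil => simp_all
    | cons b t2 =>
      simp only [List.map_cons, List.cons.injEq] at h
      have := pvDigitChar_injOn a (h1 a (by simp)) b (h2 b (by simp)) h.1
      subst this
      rw [ih t2 (fun x hx => h1 x (by simp [hx])) (fun x hx => h2 x (by simp [hx])) h.2]

lemma pvToDigits_inj (m n : Nat) (hm : m ≠ 0) (hn : n ≠ 0)
    (h : Nat.toDigits 10 m = Nat.toDigits 10 n) : m = n := by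
  rw [pvToDigits_eq m hm, pvToDigits_eq n hn] at h
  have h2 := List.reverse_injective h
  have h3 := pvMapDigitChar_inj _ _ (fun x hx => Nat.digits_lt_base (by norm_num) hx)
    (fun x hx => Nat.digits_lt_base (by norm_num) hx) h2
  calc m = Nat.ofDigits 10 (Nat.digits 10 m) := (Nat.ofDigits_digits 10 m).symm
    _ = Nat.ofDigits 10 (Nat.digits 10 n) := by rw [h3]
    _ = n := Nat.ofDigits_digits 10 n

lemma pvToChars_inj (j k : Int) (hj : 1 ≤ j) (hk : 1 ≤ k)
    (h : PySem.Int.toChars j = PySem.Int.toChars k) : j = k := by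
  unfold PySem.Int.toChars at h
  rw [if_neg (by omega), if_neg (by omega)] at h
  have := pvToDigits_inj j.toNat k.toNat (by omega) (by omega) h
  omega

def pvCand (base : String) (k : Int) : String := if k = 1 then base else pvSuffixed base k

lemma pvSuffixed_toList (base : String) (k : Int) :
    (pvSuffixed base k).toList = base.toList ++ '_' :: PySem.Int.toChars k := by
  simp [pvSuffixed, pvCat, String.toList_ofList, PySem.Int.toStr]

lemma pvCand_inj (base : String) (j k : Int) (hj : 1 ≤ j) (hk : 1 ≤ k)
    (h : pvCand base j = pvCand base k) : j = k := by
  unfold pvCand at h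
  by_cases h1 : j = 1 <;> by_cases h2 : k = 1
  · omega
  · exfalso
    rw [if_pos h1, if_neg h2] at h
    have := congrArg (fun s => s.toList.length) h
    simp [pvSuffixed_toList] at this
  · exfalso
    rw [if_neg h1, if_pos h2] at h
    have := congrArg (fun s => s.toList.length) h
    simp [pvSuffixed_toList] at this
  · rw [if_neg h1, if_neg h2] at h
    have h3 := congrArg String.toList h
    rw [pvSuffixed_toList, pvSuffixed_toList] at h3
    have h4 := List.append_cancel_left h3
    exact pvToChars_inj j k hj hk (by simpa using h4)


lemma pvBlocked_le (ex : List String) (base : String) (n : Nat)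
    (h : ∀ j < n, pvCand base ((j : Int) + 1) ∈ ex) : n ≤ ex.length := by
  have hinj : Function.Injective (fun j : Nat => pvCand base ((j : Int) + 1)) := by
    intro a b hab
    have := pvCand_inj base ((a : Int) + 1) ((b : Int) + 1) (by omega) (by omega) hab
    omega
  have hnd : ((List.range n).map (fun j : Nat => pvCand base ((j : Int) + 1))).Nodup :=
    (List.nodup_range).map hinj
  have hsub : ((List.range n).map (fun j : Nat => pvCand base ((j : Int) + 1))) ⊆ ex := by
    intro x hx
    simp only [List.mem_map, List.mem_range] at hx
    obtain ⟨j, hj, rfl⟩ := hx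
    exact h j hj
  calc n = ((List.range n).map (fun j : Nat => pvCand base ((j : Int) + 1))).length := by simp
    _ = ((List.range n).map (fun j : Nat => pvCand base ((j : Int) + 1))).toFinset.card :=
        (List.toFinset_card_of_nodup hnd).symm
    _ ≤ ex.toFinset.card := Finset.card_le_card (fun x hx => by
        rw [List.mem_toFinset] at hx ⊢; exact hsub hx)
    _ ≤ ex.length := ex.toFinset_card_le

lemma pvFree_exists (ex : List String) (base : String) :
    ∃ j : Nat, pvCand base ((j : Int) + 1) ∉ ex := by
  by_contra hc
  have := pvBlocked_le ex base (ex.length + 1) (fun j _ => not_not.mp (not_exists.mp hc j))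
  omega


lemma pvProbe_eq (ex : PySem.Set String) (base : String) (m k : Int) (f : Nat)
    (h1 : 1 ≤ k) (hkm : k ≤ m)
    (hblocked : ∀ j : Int, k ≤ j → j < m → pvCand base j ∈ ex)
    (hfree : pvCand base m ∉ ex)
    (hfuel : (m - k).toNat < f) :
    pvProbe ex base k (pvCand base k) f = (pvCand base m, m) := by
  induction f generalizing k with
  | zero => omega
  | succ f ih =>
    rw [pvProbe]
    by_cases hk : k = m
    · subst hk
      rw [if_neg (by simp [hfree])]
    · rw [if_pos (by rw [PySem.Set.contains_iff]; exact hblocked k le_rfl (by omega))]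
      have : pvSuffixed base (k + 1) = pvCand base (k + 1) := by
        unfold pvCand; rw [if_neg (by omega)]
      rw [this]
      exact ih (k + 1) (by omega) (by omega) (fun j hj hjm => hblocked j (by omega) hjm) (by omega)

def pvInv (ex : PySem.Set String) (cnt : PySem.Dict String Int) : Prop :=
  ∀ base c, cnt.get? base = some c → 1 ≤ c ∧ ∀ j : Int, 1 ≤ j → j ≤ c → pvCand base j ∈ ex

lemma pvGo_eq (rest : List String) : ∀ (idx : Int) (ex : PySem.Set String)
    (cnt : PySem.Dict String Int) (acc : List String), pvInv ex cnt →
    pvGoA rest idx ex acc = pvGoB (pvBases rest idx) ex cnt acc := by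
  induction rest with
  | nil => intro idx ex cnt acc _; rfl
  | cons coluna rest ih =>
    intro idx ex cnt acc hinv
    simp only [pvGoA, pvBases, pvGoB]
    set base := if PySem.Str.strip coluna = "" then pvCat "coluna_" (PySem.Int.toStr idx)
      else PySem.Str.strip coluna with hbase
    have hP : ∃ j : Nat, pvCand base ((j : Int) + 1) ∉ ex := pvFree_exists ex base
    set m0 := Nat.find hP with hm0
    set m : Int := (m0 : Int) + 1 with hm
    have hfree : pvCand base m ∉ ex := Nat.find_spec hP
    have hblocked : ∀ j : Int, 1 ≤ j → j < m → pvCand base j ∈ ex := by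
      intro j hj1 hjm
      have hj : ((j - 1).toNat : Int) + 1 = j := by omega
      have := Nat.find_min hP (m := (j - 1).toNat) (by omega)
      rw [hj] at this
      exact not_not.mp this
    have hm0le : m0 ≤ ex.length := by
      apply pvBlocked_le ex base m0
      intro j hj
      exact not_not.mp (Nat.find_min hP hj)
    have hcand1 : base = pvCand base 1 := by simp [pvCand]
    have hA : pvProbe ex base 1 base (ex.length + 1) = (pvCand base m, m) := by
      conv_lhs => rw [hcand1]
      exact pvProbe_eq ex base m 1 (ex.length + 1) le_rfl (by omega)
        (fun j hj hjm => hblocked j hj hjm) hfree (by omega)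
    have hB : pvProbe ex base (cnt.getD base 1)
        (if cnt.getD base 1 = 1 then base else pvSuffixed base (cnt.getD base 1))
        (ex.length + 1) = (pvCand base m, m) := by
      have hcc : (if cnt.getD base 1 = 1 then base else pvSuffixed base (cnt.getD base 1))
          = pvCand base (cnt.getD base 1) := by
        by_cases h : cnt.getD base 1 = 1 <;> simp [pvCand, h]
      rw [hcc]
      rcases hget : cnt.get? base with _ | c
      · have hgd : cnt.getD base 1 = 1 := by
          rw [PySem.Dict.getD_eq_get?_getD, hget]; rfl
        rw [hgd]
        exact pvProbe_eq ex base m 1 (ex.length + 1) le_rfl (by omega)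
          (fun j hj hjm => hblocked j hj hjm) hfree (by omega)
      · obtain ⟨hc1, hcall⟩ := hinv base c hget
        have hgd : cnt.getD base 1 = c := by
          rw [PySem.Dict.getD_eq_get?_getD, hget]; rfl
        rw [hgd]
        have hcm : c < m := by
          by_contra hcm
          exact hfree (hcall m (by omega) (by omega))
        exact pvProbe_eq ex base m c (ex.length + 1) hc1 (by omega)
          (fun j hj hjm => hblocked j (by omega) hjm) hfree (by omega)
    rw [hA, hB]
    apply ih
    intro b' c' hg
    by_cases hb : base = b'
    · subst hb
      rw [PySem.Dict.get?_insert_self] at hg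
      obtain rfl : m = c' := by injection hg
      refine ⟨by omega, fun j hj1 hjm => ?_⟩
      rw [PySem.Set.mem_add]
      by_cases hjm' : j = m
      · right; rw [hjm']
      · left; exact hblocked j hj1 (by omega)
    · rw [PySem.Dict.get?_insert_of_ne cnt _ (Ne.symm hb)] at hg
      obtain ⟨hc1, hcall⟩ := hinv b' c' hg
      exact ⟨hc1, fun j hj1 hjm => by
        rw [PySem.Set.mem_add]; left; exact hcall j hj1 hjm⟩

-- ===== VERDICT (by name: the statement is the Claim_ definition above) =====
theorem preparar_nomes_colunas_spec : Claim_equal_preparar_nomes_colunas := by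
  intro colunas _
  unfold Spec_preparar_nomes_colunas preparar_nomes_colunas preparar_nomes_colunas_alt
  exact pvGo_eq colunas 1 PySem.Set.empty PySem.Dict.empty [] (by intro b c h; simp [PySem.Dict.empty, PySem.Dict.get?] at h)
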